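-- pv_equiv track=rewrite | github.com/Ardric/School-Projects | Python Code/Assignment 6/DictionaryFileFunctions.py | getReallyInterestingWords
-- ===== SOURCE A (Python) =====
-- def getReallyInterestingWords(listOfWords):
--     newlist = []
--     temp = ""
--     for x in listOfWords:
--         i = 0
--         count = 0
--         z = ''
--         for y in x:
--             if count > 0:
--                 if z == 'a' or z == 'e' or z == 'i' or z == 'o' or z == 'u':
--                     if y != 'a' and y != 'e' and y != 'i' and y != 'o' and y != 'u':
--                         temp = temp
--                     else:
--                         i = 1
--                 if z != 'a' and z != 'e' and z != 'i' and z != 'o' and z != 'u':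
--                     if y == 'a' or y == 'e' or y == 'i' or y == 'o' or y == 'u':
--                         temp = temp
--                     else:
--                         i = 1
--             count = count + 1
--             z = y
--         if i == 0:
--             newlist.append(x)
--     return newlist
-- ===== SOURCE B (Python) =====
-- import re
--
-- _BAD = re.compile(r'[aeiou][aeiou]|[^aeiou][^aeiou]')
--
-- def getReallyInterestingWords(listOfWords):
--     return [w for w in listOfWords if not _BAD.search(w)]
-- ===== Notes on version B (the rewrite author's own statement) =====
-- stated objective: idiomatic
-- what changed: Replaces A's stateful character-by-character scan (flags i/count/z) with a single precompiled regex that searches each word for an adjacent same-class pair (vowel-vowel or nonvowel-nonvowel) and a list comprehension keeping the words with no match.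
import Mathlib
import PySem

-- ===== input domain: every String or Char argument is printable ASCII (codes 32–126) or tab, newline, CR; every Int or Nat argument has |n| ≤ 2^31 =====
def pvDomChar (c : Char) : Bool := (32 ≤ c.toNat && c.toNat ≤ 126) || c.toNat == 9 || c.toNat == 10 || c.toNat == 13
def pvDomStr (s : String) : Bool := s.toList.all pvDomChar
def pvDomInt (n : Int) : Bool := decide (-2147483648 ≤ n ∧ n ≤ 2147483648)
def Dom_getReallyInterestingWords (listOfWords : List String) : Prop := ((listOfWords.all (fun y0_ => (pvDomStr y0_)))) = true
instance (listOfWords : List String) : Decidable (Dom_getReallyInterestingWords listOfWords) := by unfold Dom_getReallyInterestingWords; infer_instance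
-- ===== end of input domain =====

-- B replaces A's stateful flag-based scan with a "no adjacent same-class pair" test
-- (regex in Python, adjacent-pair check in Lean) inside a comprehension/filter: idiomatic, same cost.


-- ===== PORT A =====
-- one step of A's inner loop; state (i, count, z), z the previous character as a 1-char string
def pvStepA (st : Int × Int × String) (y : Char) : Int × Int × String :=
  let i := st.1
  let count := st.2.1
  let z := st.2.2
  let i :=
    if count > 0 then
      let i :=
        if z = "a" ∨ z = "e" ∨ z = "i" ∨ z = "o" ∨ z = "u" then
          if y ≠ 'a' ∧ y ≠ 'e' ∧ y ≠ 'i' ∧ y ≠ 'o' ∧ y ≠ 'u' then i else (1 : Int)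
        else i
      let i :=
        if z ≠ "a" ∧ z ≠ "e" ∧ z ≠ "i" ∧ z ≠ "o" ∧ z ≠ "u" then
          if y = 'a' ∨ y = 'e' ∨ y = 'i' ∨ y = 'o' ∨ y = 'u' then i else (1 : Int)
        else i
      i
    else i
  (i, count + 1, String.ofList [y])

def getReallyInterestingWords (listOfWords : List String) : List String :=
  listOfWords.foldl
    (fun newlist x =>
      let st := x.toList.foldl pvStepA ((0 : Int), (0 : Int), "")
      if st.1 = 0 then newlist ++ [x] else newlist)
    []

-- ===== PORT B =====
-- Source B: regex [aeiou][aeiou]|[^aeiou][^aeiou] finds an adjacent same-class pair;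
-- ported exactly as: some adjacent pair of characters has equal vowel-class.
def pvIsVowel (c : Char) : Bool := c = 'a' || c = 'e' || c = 'i' || c = 'o' || c = 'u'

def pvHasBadPair (w : String) : Bool :=
  (w.toList.zip w.toList.tail).any (fun p => pvIsVowel p.1 == pvIsVowel p.2)

def getReallyInterestingWords_alt (listOfWords : List String) : List String :=
  listOfWords.filter (fun w => ! pvHasBadPair w)

-- ===== PRECONDITION & SPEC =====
def Spec_getReallyInterestingWords (listOfWords : List String) (out : List String) : Prop := out = getReallyInterestingWords_alt listOfWords
instance (listOfWords : List String) (out : List String) : Decidable (Spec_getReallyInterestingWords listOfWords out) := by unfold Spec_getReallyInterestingWords; infer_instance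

-- ===== CLAIM (what is proved, stated in full; the proofs are below) =====
def Claim_equal_getReallyInterestingWords : Prop := ∀ (listOfWords : List String), Dom_getReallyInterestingWords listOfWords → Spec_getReallyInterestingWords listOfWords (getReallyInterestingWords listOfWords)

-- ===== LEMMAS AND PROOFS =====

-- alternation predicate: previous char c, remaining chars cs
def pvAlt (c : Char) : List Char → Bool
  | [] => true
  | d :: cs => (pvIsVowel c != pvIsVowel d) && pvAlt d cs

theorem pvAlt_eq_not_bad (cs : List Char) : ∀ c : Char,
    ((c :: cs).zip cs).any (fun p => pvIsVowel p.1 == pvIsVowel p.2) = ! pvAlt c cs := by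
  induction cs with
  | nil => intro c; simp [pvAlt]
  | cons d cs ih =>
      intro c
      simp [pvAlt, List.any_cons, ih d, Bool.not_and]
      cases pvIsVowel c <;> cases pvIsVowel d <;> simp

theorem pvSingle_eq (y c : Char) : (String.ofList [y] = String.ofList [c]) ↔ y = c := by
  constructor
  · intro h
    have := congrArg String.toList h
    simpa using this
  · intro h; rw [h]

theorem pvZvowel (c : Char) :
    (String.ofList [c] = "a" ∨ String.ofList [c] = "e" ∨ String.ofList [c] = "i" ∨
      String.ofList [c] = "o" ∨ String.ofList [c] = "u") ↔ pvIsVowel c = true := by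
  have ha : ("a" : String) = String.ofList ['a'] := rfl
  have he : ("e" : String) = String.ofList ['e'] := rfl
  have hi : ("i" : String) = String.ofList ['i'] := rfl
  have ho : ("o" : String) = String.ofList ['o'] := rfl
  have hu : ("u" : String) = String.ofList ['u'] := rfl
  rw [ha, he, hi, ho, hu, pvSingle_eq, pvSingle_eq, pvSingle_eq, pvSingle_eq, pvSingle_eq]
  simp only [pvIsVowel, Bool.or_eq_true, decide_eq_true_eq]
  tauto

theorem pvZcons (c : Char) :
    (String.ofList [c] ≠ "a" ∧ String.ofList [c] ≠ "e" ∧ String.ofList [c] ≠ "i" ∧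
      String.ofList [c] ≠ "o" ∧ String.ofList [c] ≠ "u") ↔ pvIsVowel c = false := by
  have h := pvZvowel c
  constructor
  · intro hyp
    cases hb : pvIsVowel c
    · rfl
    · exact absurd (h.mpr hb) (by tauto)
  · intro hb
    by_contra hcon
    have : pvIsVowel c = true := h.mp (by tauto)
    simp [hb] at this
  
theorem pvYvowel (d : Char) :
    (d = 'a' ∨ d = 'e' ∨ d = 'i' ∨ d = 'o' ∨ d = 'u') ↔ pvIsVowel d = true := by
  simp only [pvIsVowel, Bool.or_eq_true, decide_eq_true_eq]
  tauto

theorem pvYcons (d : Char) :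
    (d ≠ 'a' ∧ d ≠ 'e' ∧ d ≠ 'i' ∧ d ≠ 'o' ∧ d ≠ 'u') ↔ pvIsVowel d = false := by
  have h := pvYvowel d
  constructor
  · intro hyp
    cases hb : pvIsVowel d
    · rfl
    · exact absurd (h.mpr hb) (by tauto)
  · intro hb
    by_contra hcon
    have : pvIsVowel d = true := h.mp (by tauto)
    simp [hb] at this

-- after the first character, i=1 is absorbing
theorem pvFold_one (cs : List Char) : ∀ (k : Int) (c : Char), k > 0 →
    (cs.foldl pvStepA ((1 : Int), k, String.ofList [c])).1 = 1 := by
  induction cs with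
  | nil => intro k c _; simp
  | cons d cs ih =>
      intro k c hk
      have hstep : pvStepA ((1 : Int), k, String.ofList [c]) d = (1, k + 1, String.ofList [d]) := by
        simp only [pvStepA]
        split_ifs <;> rfl
      rw [List.foldl_cons, hstep]
      exact ih (k + 1) d (by omega)

theorem pvStep_from_zero (k : Int) (c d : Char) (hk : k > 0) :
    pvStepA ((0 : Int), k, String.ofList [c]) d
      = (if pvIsVowel c != pvIsVowel d then (0 : Int) else 1, k + 1, String.ofList [d]) := by
  simp only [pvStepA]
  rw [if_pos hk]
  simp only [pvZvowel, pvZcons, pvYvowel, pvYcons]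
  cases hv : pvIsVowel c <;> cases hw : pvIsVowel d <;> simp

theorem pvFold_zero (cs : List Char) : ∀ (k : Int) (c : Char), k > 0 →
    (cs.foldl pvStepA ((0 : Int), k, String.ofList [c])).1 = (if pvAlt c cs then (0 : Int) else 1) := by
  induction cs with
  | nil => intro k c _; simp [pvAlt]
  | cons d cs ih =>
      intro k c hk
      rw [List.foldl_cons, pvStep_from_zero k c d hk]
      cases h : (pvIsVowel c != pvIsVowel d)
      · rw [if_neg (by simp : ¬ (false = true)), pvFold_one cs (k + 1) d (by omega)]
        simp [pvAlt, h]
      · rw [if_pos rfl, ih (k + 1) d (by omega)]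
        simp [pvAlt, h]

theorem pvWord_eq (x : String) :
    ((x.toList.foldl pvStepA ((0 : Int), (0 : Int), "")).1 = 0) = ((! pvHasBadPair x) = true) := by
  cases hx : x.toList with
  | nil => simp [pvHasBadPair, hx]
  | cons c cs =>
      have hstep : pvStepA ((0 : Int), (0 : Int), "") c = (0, 1, String.ofList [c]) := by
        simp [pvStepA]
      rw [List.foldl_cons, hstep, pvFold_zero cs 1 c (by omega)]
      simp only [pvHasBadPair, hx]
      rw [show (c :: cs).tail = cs from rfl, pvAlt_eq_not_bad cs c]
      by_cases h : pvAlt c cs <;> simp [h]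

-- ===== VERDICT (by name: the statement is the Claim_ definition above) =====
theorem getReallyInterestingWords_spec : Claim_equal_getReallyInterestingWords := by
  intro listOfWords _
  unfold Spec_getReallyInterestingWords getReallyInterestingWords getReallyInterestingWords_alt
  rw [show (fun newlist x =>
        let st := x.toList.foldl pvStepA ((0 : Int), (0 : Int), "")
        if st.1 = 0 then newlist ++ [x] else newlist)
      = (fun (newlist : List String) x =>
        if (! pvHasBadPair x) = true then newlist ++ [x] else newlist) from by
    funext newlist x
    simp only []
    have h := pvWord_eq x
    by_cases h0 : (x.toList.foldl pvStepA ((0 : Int), (0 : Int), "")).1 = 0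
    · rw [if_pos h0, if_pos (h ▸ h0)]
    · rw [if_neg h0, if_neg (fun hb => h0 (h ▸ hb))]]
  rw [PySem.List.foldl_append_if_eq_filter]
  simp
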